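-- pv_equiv track=rewrite | github.com/jimmyhuang921114/jimmy_tableball | all_ball_pool0805.py | find_min_negative_integer_in_nested_list
-- ===== SOURCE A (Python) =====
-- def find_min_negative_integer_in_nested_list(lst):
--     min_negative = None
--     min_position1 = None
--     min_position2 = None
--
--     for i, sublist in enumerate(lst):
--         for j, value in enumerate(sublist):
--             if isinstance(value, (int, float)) and value < 0:
--                 if min_negative is None or value > min_negative:
--                     min_negative = value
--                     min_position1, min_position2 = i, j
--
--     return min_negative, min_position1, min_position2
-- ===== SOURCE B (Python) =====
-- def find_min_negative_integer_in_nested_list(lst):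
--     negs = [v for sub in lst for v in sub
--             if isinstance(v, (int, float)) and v < 0]
--     if not negs:
--         return None, None, None
--     best = max(negs)
--     for i, sub in enumerate(lst):
--         for j, v in enumerate(sub):
--             if isinstance(v, (int, float)) and v == best:
--                 return best, i, j
-- ===== Notes on version B (the rewrite author's own statement) =====
-- stated objective: alternative
-- what changed: Replaces A's single pass carrying a running best (value, i, j) with a value-then-locate scheme: first flatten out the negative values and take their maximum, then a second scan searches for the first position holding that value and returns early there; no positional state is threaded through the scan.
import Mathlib
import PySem

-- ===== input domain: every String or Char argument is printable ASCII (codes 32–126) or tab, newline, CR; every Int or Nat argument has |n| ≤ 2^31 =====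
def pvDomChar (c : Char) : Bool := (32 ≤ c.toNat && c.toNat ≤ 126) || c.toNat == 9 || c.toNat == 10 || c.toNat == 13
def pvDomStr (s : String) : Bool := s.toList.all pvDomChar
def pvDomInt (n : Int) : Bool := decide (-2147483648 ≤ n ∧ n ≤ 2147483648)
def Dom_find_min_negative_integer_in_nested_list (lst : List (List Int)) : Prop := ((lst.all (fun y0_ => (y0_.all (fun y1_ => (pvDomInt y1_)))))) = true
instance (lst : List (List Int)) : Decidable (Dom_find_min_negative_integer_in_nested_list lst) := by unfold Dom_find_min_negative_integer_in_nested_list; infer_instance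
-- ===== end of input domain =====

-- B replaces A's single scan carrying a running best (value,i,j) with a value-then-locate scheme: flatten the negatives, take their max, then search for its first position (objective: alternative).


-- ===== PORT A =====
-- the running-best update of A's innermost 'if' (None-or-greater test, then overwrite)
def pvUpd (st : Option Int × Option Int × Option Int) (t : Int × Int × Int) : Option Int × Option Int × Option Int :=
  match st.1 with
  | none => (some t.1, some t.2.1, some t.2.2)
  | some m => if t.1 > m then (some t.1, some t.2.1, some t.2.2) else st

-- the isinstance(value,(int,float)) guard is always true on List Int and is dropped
def find_min_negative_integer_in_nested_list (lst : List (List Int)) : Option Int × Option Int × Option Int :=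
  (PySem.List.enumerate lst).foldl (fun st p =>
    (PySem.List.enumerate p.2).foldl (fun st q =>
      if q.2 < 0 then pvUpd st (q.2, p.1, q.1) else st) st)
    (none, none, none)

-- ===== PORT B =====
-- Source B: negs = [v for sub in lst for v in sub if v < 0]; if empty return Nones;
-- best = max(negs) (Python's max of a nonempty int list IS the running max, PySem.List.max?_id_cons);
-- then scan (i, sub), (j, v) for the first v == best and return early there (unreachable 'none' arm kept for totality).
def find_min_negative_integer_in_nested_list_alt (lst : List (List Int)) : Option Int × Option Int × Option Int :=
  let negs := lst.flatMap (fun sub => sub.filter (fun v => decide (v < 0)))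
  match negs with
  | [] => (none, none, none)
  | n :: ns =>
    let best := ns.foldl max n
    match (PySem.List.enumerate lst).findSome? (fun p =>
        ((PySem.List.enumerate p.2).find? (fun q => q.2 == best)).map (fun q => (p.1, q.1))) with
    | some (i, j) => (some best, some i, some j)
    | none => (none, none, none)

-- ===== PRECONDITION & SPEC =====
def Spec_find_min_negative_integer_in_nested_list (lst : List (List Int)) (out : Option Int × Option Int × Option Int) : Prop := out = find_min_negative_integer_in_nested_list_alt lst
instance (lst : List (List Int)) (out : Option Int × Option Int × Option Int) : Decidable (Spec_find_min_negative_integer_in_nested_list lst out) := by unfold Spec_find_min_negative_integer_in_nested_list; infer_instance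

-- ===== CLAIM (what is proved, stated in full; the proofs are below) =====
def Claim_equal_find_min_negative_integer_in_nested_list : Prop := ∀ (lst : List (List Int)), Dom_find_min_negative_integer_in_nested_list lst → Spec_find_min_negative_integer_in_nested_list lst (find_min_negative_integer_in_nested_list lst)

-- ===== LEMMAS AND PROOFS =====

-- first-maximal selection on candidate triples, and the common normal form of both programs
def pvPick (b t : Int × Int × Int) : Int × Int × Int := if t.1 > b.1 then t else b

def pvCands (lst : List (List Int)) : List (Int × Int × Int) :=
  (PySem.List.enumerate lst).flatMap (fun p =>
    (PySem.List.enumerate p.2).filterMap (fun q =>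
      if q.2 < 0 then some (q.2, p.1, q.1) else none))

def pvF (cands : List (Int × Int × Int)) : Option Int × Option Int × Option Int :=
  match cands with
  | [] => (none, none, none)
  | c :: cs =>
      let r := cs.foldl pvPick c
      (some r.1, some r.2.1, some r.2.2)

-- ---- A-side: A = pvF (pvCands lst) ----

theorem pv_inner (i : Int) (l : List (Int × Int)) (st : Option Int × Option Int × Option Int) :
    l.foldl (fun st q => if q.2 < 0 then pvUpd st (q.2, i, q.1) else st) st
      = (l.filterMap (fun q => if q.2 < 0 then some (q.2, i, q.1) else none)).foldl pvUpd st := by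
  induction l generalizing st with
  | nil => rfl
  | cons q l ih =>
      simp only [List.foldl_cons, List.filterMap_cons]
      by_cases h : q.2 < 0 <;> simp [h, ih]

theorem pv_flat {α β γ : Type} (f : γ → β → γ) (g : α → List β) (L : List α) (st : γ) :
    L.foldl (fun st x => (g x).foldl f st) st = (L.flatMap g).foldl f st := by
  induction L generalizing st with
  | nil => rfl
  | cons x L ih => simp [List.foldl_append, ih]

theorem pv_max (cs : List (Int × Int × Int)) (b : Int × Int × Int) :
    cs.foldl pvUpd (some b.1, some b.2.1, some b.2.2)
      = (fun m => (some m.1, some m.2.1, some m.2.2)) (cs.foldl pvPick b) := by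
  induction cs generalizing b with
  | nil => rfl
  | cons t cs ih =>
      simp only [List.foldl_cons]
      by_cases h : t.1 > b.1 <;> simp [pvUpd, pvPick, h, ih]

theorem pv_select (cands : List (Int × Int × Int)) :
    cands.foldl pvUpd (none, none, none) = pvF cands := by
  cases cands with
  | nil => rfl
  | cons c cs =>
      simp only [List.foldl_cons]
      have : pvUpd (none, none, none) c = (some c.1, some c.2.1, some c.2.2) := rfl
      rw [this, pv_max, pvF]

theorem pv_A_eq (lst : List (List Int)) :
    find_min_negative_integer_in_nested_list lst = pvF (pvCands lst) := by
  unfold find_min_negative_integer_in_nested_list pvCands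
  simp only [pv_inner, pv_flat, pv_select]

-- ---- B-side: alt = pvF (pvCands lst) ----

theorem pv_negs_inner (i : Int) (l : List (Int × Int)) :
    (l.filterMap (fun q => if q.2 < 0 then some (q.2, i, q.1) else none)).map (·.1)
      = (l.map (·.2)).filter (fun v => decide (v < 0)) := by
  induction l with
  | nil => rfl
  | cons q l ih =>
      by_cases h : q.2 < 0 <;> simp [h, ih]

theorem pv_negs (lst : List (List Int)) :
    lst.flatMap (fun sub => sub.filter (fun v => decide (v < 0))) = (pvCands lst).map (·.1) := by
  unfold pvCands
  rw [List.map_flatMap]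
  have h1 : ∀ p : Int × List Int,
      ((PySem.List.enumerate p.2).filterMap (fun q =>
        if q.2 < 0 then some (q.2, p.1, q.1) else none)).map (·.1)
      = p.2.filter (fun v => decide (v < 0)) := by
    intro p
    rw [pv_negs_inner, PySem.List.map_snd_enumerate]
  calc lst.flatMap (fun sub => sub.filter (fun v => decide (v < 0)))
      = ((PySem.List.enumerate lst).map (·.2)).flatMap (fun sub => sub.filter (fun v => decide (v < 0))) := by
        rw [PySem.List.map_snd_enumerate]
    _ = (PySem.List.enumerate lst).flatMap (fun p => p.2.filter (fun v => decide (v < 0))) := by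
        rw [List.flatMap_map]
    _ = _ := by
        have h2 : (fun p : Int × List Int => p.2.filter (fun v => decide (v < 0)))
            = fun p : Int × List Int => ((PySem.List.enumerate p.2).filterMap (fun q =>
                if q.2 < 0 then some (q.2, p.1, q.1) else none)).map (·.1) :=
          funext fun p => (h1 p).symm
        rw [h2]

theorem pv_proj (cs : List (Int × Int × Int)) (b : Int × Int × Int) :
    (cs.foldl pvPick b).1 = (cs.map (·.1)).foldl max b.1 := by
  induction cs generalizing b with
  | nil => rfl
  | cons t cs ih =>
      simp only [List.foldl_cons, List.map_cons]
      rw [ih]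
      congr 1
      simp only [pvPick]
      rcases lt_or_ge b.1 t.1 with h | h
      · rw [if_pos h, max_eq_right h.le]
      · rw [if_neg (not_lt.mpr h), max_eq_left h]

theorem pv_mem (cs : List (Int × Int × Int)) (b : Int × Int × Int) :
    cs.foldl pvPick b ∈ b :: cs := by
  induction cs generalizing b with
  | nil => simp
  | cons t cs ih =>
      simp only [List.foldl_cons]
      rcases List.mem_cons.mp (ih (pvPick b t)) with h1 | h1
      · rw [h1]; unfold pvPick; split <;> simp
      · simp [h1]

theorem pv_le (cs : List (Int × Int × Int)) (b : Int × Int × Int) :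
    b.1 ≤ (cs.foldl pvPick b).1 := by
  induction cs generalizing b with
  | nil => exact le_refl _
  | cons t cs ih =>
      simp only [List.foldl_cons]
      refine le_trans ?_ (ih (pvPick b t))
      simp only [pvPick]; split <;> omega

theorem pv_find_firstmax (cs : List (Int × Int × Int)) (b : Int × Int × Int) :
    (b :: cs).find? (fun t => t.1 == (cs.foldl pvPick b).1) = some (cs.foldl pvPick b) := by
  induction cs generalizing b with
  | nil => simp
  | cons t cs ih =>
      simp only [List.foldl_cons]
      by_cases h : t.1 > b.1
      · have hp : pvPick b t = t := by simp [pvPick, h]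
        rw [hp]
        have hlt : b.1 < (cs.foldl pvPick t).1 := lt_of_lt_of_le h (pv_le cs t)
        rw [List.find?_cons_of_neg (by simp; omega), ih t]
      · have hp : pvPick b t = b := by simp [pvPick, h]
        rw [hp]
        by_cases hb : b.1 = (cs.foldl pvPick b).1
        · have hfind := ih b
          rw [List.find?_cons_of_pos (by simp [hb])] at hfind
          have hbr : b = cs.foldl pvPick b := by injection hfind
          rw [List.find?_cons_of_pos (by simp [hb])]
          rw [← hbr]
        · have hble : b.1 ≤ (cs.foldl pvPick b).1 := pv_le cs b
          have ht : t.1 ≠ (cs.foldl pvPick b).1 := by omega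
          have hfind := ih b
          rw [List.find?_cons_of_neg (by simp [hb])] at hfind
          rw [List.find?_cons_of_neg (by simp [hb]), List.find?_cons_of_neg (by simp [ht])]
          exact hfind

theorem pv_find_flatMap {α β : Type} (L : List α) (g : α → List β) (p : β → Bool) :
    (L.flatMap g).find? p = L.findSome? (fun x => (g x).find? p) := by
  induction L with
  | nil => rfl
  | cons x L ih =>
      simp only [List.flatMap_cons, List.find?_append, List.findSome?_cons]
      cases h : (g x).find? p <;> simp [ih]

theorem pv_findSome_map {α β γ : Type} (L : List α) (h : α → Option β) (g : β → γ) :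
    L.findSome? (fun x => (h x).map g) = (L.findSome? h).map g := by
  induction L with
  | nil => rfl
  | cons x L ih =>
      simp only [List.findSome?_cons]
      cases hx : h x <;> simp [ih]

theorem pv_inner_find (i best : Int) (hbest : best < 0) (l : List (Int × Int)) :
    ((l.find? (fun q => q.2 == best)).map (fun q => (i, q.1)))
      = ((l.filterMap (fun q => if q.2 < 0 then some (q.2, i, q.1) else none)).find?
          (fun t => t.1 == best)).map (fun t => (t.2.1, t.2.2)) := by
  induction l with
  | nil => rfl
  | cons q l ih =>
      by_cases hq : q.2 = best
      · subst hq
        simp [hbest, List.find?_cons_of_pos]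
      · by_cases hn : q.2 < 0
        · simp only [List.filterMap_cons, if_pos hn]
          rw [List.find?_cons_of_neg (by simp [hq]), List.find?_cons_of_neg (by simp [hq])]
          exact ih
        · simp only [List.filterMap_cons, if_neg hn]
          rw [List.find?_cons_of_neg (by simp [hq])]
          exact ih

theorem pv_cands_neg (lst : List (List Int)) :
    ∀ t ∈ pvCands lst, t.1 < 0 := by
  intro t ht
  unfold pvCands at ht
  simp only [List.mem_flatMap, List.mem_filterMap] at ht
  obtain ⟨p, _, q, _, hq⟩ := ht
  by_cases h : q.2 < 0
  · rw [if_pos h] at hq; cases hq; exact h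
  · rw [if_neg h] at hq; cases hq

theorem pv_B_eq (lst : List (List Int)) :
    find_min_negative_integer_in_nested_list_alt lst = pvF (pvCands lst) := by
  unfold find_min_negative_integer_in_nested_list_alt
  rw [pv_negs]
  cases hc : pvCands lst with
  | nil => rfl
  | cons c cs =>
      simp only [List.map_cons]
      have hbest : (cs.map (·.1)).foldl max c.1 = (cs.foldl pvPick c).1 := (pv_proj cs c).symm
      rw [hbest]
      set r := cs.foldl pvPick c with hr
      have hrneg : r.1 < 0 := by
        apply pv_cands_neg lst
        rw [hc]
        exact pv_mem cs c
      have hfun : (fun p : Int × List Int =>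
            ((PySem.List.enumerate p.2).find? (fun q => q.2 == r.1)).map (fun q => (p.1, q.1)))
          = (fun p : Int × List Int =>
            (((PySem.List.enumerate p.2).filterMap (fun q =>
              if q.2 < 0 then some (q.2, p.1, q.1) else none)).find?
              (fun t => t.1 == r.1)).map (fun t => (t.2.1, t.2.2))) := by
        funext p
        exact pv_inner_find p.1 r.1 hrneg (PySem.List.enumerate p.2)
      rw [hfun, pv_findSome_map, ← pv_find_flatMap]
      have : pvCands lst = (PySem.List.enumerate lst).flatMap (fun p =>
          (PySem.List.enumerate p.2).filterMap (fun q =>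
            if q.2 < 0 then some (q.2, p.1, q.1) else none)) := rfl
      rw [← this, hc, pv_find_firstmax cs c]
      simp [pvF, ← hr]

-- ===== VERDICT (by name: the statement is the Claim_ definition above) =====
theorem find_min_negative_integer_in_nested_list_spec : Claim_equal_find_min_negative_integer_in_nested_list := by
  intro lst _
  unfold Spec_find_min_negative_integer_in_nested_list
  rw [pv_A_eq, pv_B_eq]
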